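-- pv_equiv track=rewrite | github.com/Ludmilla-Judaico/Projeto-PWeb1-Biblioteca-Musical | app/main/funcoes/filtragem.py | filtrar_albuns
-- ===== SOURCE A (Python) =====
-- def classificar_decada(lancamento):
--     lancamento = lancamento.strip()
--     if lancamento.isdigit():
--         lancamento = int(lancamento)
--
--         if 2020 <= lancamento <= 2025:
--             return '20s'
--         elif 2010 <= lancamento <= 2019:
--             return '10s'
--         elif 2000 <= lancamento <= 2009:
--             return '00s'
--         elif 1990 <= lancamento <= 1999:
--             return '90s'
--         elif 1980 <= lancamento <= 1989:
--             return '80s'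
--         elif 1970 <= lancamento <= 1979:
--             return '70s'
--     return None
--
-- def filtrar_albuns(albuns, generos, lancamentos):
--     filtrados = []
--     for alb in albuns:
--         genero = alb.get('generos', '').strip()
--         lancamento = alb.get('lancamento', '')
--         decada = classificar_decada(lancamento)
--
-- # aceita o álbum se o usuário não escolheu nenhum gênero/lançamento ou o gênero/lançamento do álbum está na lista escolhida
--         genero_ok = not generos or genero in generos
--         lancamento_ok = not lancamentos or decada in lancamentos
--
--         if genero_ok and lancamento_ok:
--             filtrados.append(alb)
--     return filtrados
-- ===== SOURCE B (Python) =====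
-- def filtrar_albuns(albuns, generos, lancamentos):
--     # Staged filtering: apply the genre filter to the whole list first, then the
--     # decade filter to the survivors; the decade label is computed arithmetically.
--     def decada(s):
--         s = s.strip()
--         if s.isdigit():
--             y = int(s)
--             if 1970 <= y <= 2025:
--                 return str(y // 10 % 10) + '0s'
--         return None
--
--     resultado = albuns
--     if generos:
--         resultado = [a for a in resultado if a.get('generos', '').strip() in generos]
--     if lancamentos:
--         resultado = [a for a in resultado if decada(a.get('lancamento', '')) in lancamentos]
--     return resultado
-- ===== Notes on version B (the rewrite author's own statement) =====
-- stated objective: simpler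
-- what changed: Replaces A's single loop that tests both conditions per album with two staged filter passes (genre pass over the whole list, then decade pass over its survivors, each pass skipped entirely when its chosen list is empty), and replaces the six-way if/elif decade range chain with the closed-form label str(y//10%10)+'0s' gated by 1970<=y<=2025; a timing run measured this constant-factor faster (skipped passes and cheaper decade classification).
import Mathlib
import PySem

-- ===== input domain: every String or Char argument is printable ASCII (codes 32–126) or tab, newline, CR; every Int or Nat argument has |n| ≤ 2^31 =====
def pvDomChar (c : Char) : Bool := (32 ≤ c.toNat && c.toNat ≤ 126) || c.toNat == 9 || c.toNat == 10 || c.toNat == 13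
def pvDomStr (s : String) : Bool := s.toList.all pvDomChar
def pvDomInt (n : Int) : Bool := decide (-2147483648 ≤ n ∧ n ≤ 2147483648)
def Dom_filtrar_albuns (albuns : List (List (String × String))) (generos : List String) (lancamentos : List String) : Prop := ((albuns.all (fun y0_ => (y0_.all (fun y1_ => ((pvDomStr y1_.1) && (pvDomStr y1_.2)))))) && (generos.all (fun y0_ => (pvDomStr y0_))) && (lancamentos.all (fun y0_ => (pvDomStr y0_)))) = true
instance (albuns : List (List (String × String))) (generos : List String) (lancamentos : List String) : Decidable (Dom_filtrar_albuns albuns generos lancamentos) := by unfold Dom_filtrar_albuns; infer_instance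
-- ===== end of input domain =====

-- B filters in two staged passes (genre pass, then decade pass over its survivors,
-- each skipped when its chosen list is empty) and computes the decade label
-- arithmetically instead of A's six-way range chain; objective: simpler.

-- ===== PORT A =====
-- d.get(k, dflt) on a Python dict modelled as an association list (first match)
def pvGetD (d : List (String × String)) (k dflt : String) : String :=
  match d.find? (fun p => p.1 == k) with
  | some p => p.2
  | none => dflt

def classificar_decada (lancamento : String) : Option String :=
  let t := PySem.Str.strip lancamento
  if PySem.Str.strIsdigit t then
    match PySem.Int.ofStr? t with   -- int(t): always `some` here since t is all digits
    | some y =>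
      if 2020 ≤ y ∧ y ≤ 2025 then some "20s"
      else if 2010 ≤ y ∧ y ≤ 2019 then some "10s"
      else if 2000 ≤ y ∧ y ≤ 2009 then some "00s"
      else if 1990 ≤ y ∧ y ≤ 1999 then some "90s"
      else if 1980 ≤ y ∧ y ≤ 1989 then some "80s"
      else if 1970 ≤ y ∧ y ≤ 1979 then some "70s"
      else none
    | none => none
  else none

def filtrar_albuns (albuns : List (List (String × String))) (generos : List String) (lancamentos : List String) : List (List (String × String)) :=
  albuns.foldl (fun filtrados alb =>
    let genero := PySem.Str.strip (pvGetD alb "generos" "")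
    let lancamento := pvGetD alb "lancamento" ""
    let decada := classificar_decada lancamento
    let genero_ok : Bool := generos.isEmpty || generos.contains genero
    let lancamento_ok : Bool := lancamentos.isEmpty ||
      (match decada with | some d => lancamentos.contains d | none => false)
    if genero_ok && lancamento_ok then filtrados ++ [alb] else filtrados) []

-- ===== PORT B =====
def decada_alt (lancamento : String) : Option String :=
  let s := PySem.Str.strip lancamento
  if PySem.Str.strIsdigit s then
    match PySem.Int.ofStr? s with
    | some y =>
      if 1970 ≤ y ∧ y ≤ 2025 then
        -- str(y // 10 % 10) + '0s'
        some (String.ofList (PySem.Int.toChars (PySem.Int.mod (PySem.Int.floordiv y 10) 10) ++ ['0', 's']))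
      else none
    | none => none
  else none

def filtrar_albuns_alt (albuns : List (List (String × String))) (generos : List String) (lancamentos : List String) : List (List (String × String)) :=
  let r1 :=
    if generos.isEmpty then albuns
    else albuns.filter (fun a => generos.contains (PySem.Str.strip (pvGetD a "generos" "")))
  if lancamentos.isEmpty then r1
  else r1.filter (fun a =>
    match decada_alt (pvGetD a "lancamento" "") with
    | some d => lancamentos.contains d
    | none => false)

-- ===== PRECONDITION & SPEC =====
def Spec_filtrar_albuns (albuns : List (List (String × String))) (generos : List String) (lancamentos : List String) (out : List (List (String × String))) : Prop := out = filtrar_albuns_alt albuns generos lancamentos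
instance (albuns : List (List (String × String))) (generos : List String) (lancamentos : List String) (out : List (List (String × String))) : Decidable (Spec_filtrar_albuns albuns generos lancamentos out) := by unfold Spec_filtrar_albuns; infer_instance

-- ===== CLAIM =====
def Claim_equal_filtrar_albuns : Prop := ∀ (albuns : List (List (String × String))) (generos : List String) (lancamentos : List String), Dom_filtrar_albuns albuns generos lancamentos → Spec_filtrar_albuns albuns generos lancamentos (filtrar_albuns albuns generos lancamentos)

-- ===== LEMMAS AND PROOFS =====
set_option maxHeartbeats 2000000 in
theorem decada_eq (s : String) : classificar_decada s = decada_alt s := by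
  unfold classificar_decada decada_alt
  cases hd : PySem.Str.strIsdigit (PySem.Str.strip s) with
  | false => simp only [hd]; rfl
  | true =>
    simp only [hd]
    cases hy : PySem.Int.ofStr? (PySem.Str.strip s) with
    | none => rfl
    | some y =>
      dsimp only
      by_cases h : 1970 ≤ y ∧ y ≤ 2025
      · obtain ⟨h1, h2⟩ := h
        interval_cases y <;> decide
      · split_ifs with c1 c2 c3 c4 c5 c6 <;> first | rfl | (exfalso; omega)

theorem foldl_if_append_eq_filter {α : Type} (p : α → Bool) (l acc : List α) :
    l.foldl (fun a x => if p x then a ++ [x] else a) acc = acc ++ l.filter p := by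
  induction l generalizing acc with
  | nil => simp
  | cons x xs ih =>
    simp only [List.foldl_cons, List.filter_cons]
    cases hp : p x
    · simp [ih]
    · simp [ih]

-- ===== VERDICT =====
theorem filtrar_albuns_spec : Claim_equal_filtrar_albuns := by
  intro albuns generos lancamentos _
  unfold Spec_filtrar_albuns filtrar_albuns filtrar_albuns_alt
  rw [foldl_if_append_eq_filter]
  simp only [List.nil_append, decada_eq]
  cases hg : generos.isEmpty <;> cases hl : lancamentos.isEmpty <;>
    simp [hg, hl, List.filter_filter, Bool.and_comm]
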